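-- pv_equiv track=rewrite | github.com/alexander-mipt/formal-verification | cxx_impl/boundedQueue/test.py | checkSymbols
-- ===== SOURCE A (Python) =====
-- def checkSymbols(string: str) -> bool:
-- 	symbols1 = set()
-- 	symbols2 = set()
-- 	for s in string:
-- 		if s not in symbols1:
-- 			symbols1.add(s)
-- 		else:
-- 			symbols2.add(s)
-- 	return symbols1 == symbols2
-- ===== SOURCE B (Python) =====
-- def checkSymbols(string: str) -> bool:
--     counts = {}
--     for s in string:
--         counts[s] = counts.get(s, 0) + 1
--     return all(v >= 2 for v in counts.values())
-- ===== Notes on version B (the rewrite author's own statement) =====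
-- stated objective: idiomatic
-- what changed: Replaces the two seen-once/seen-twice sets and the final set-equality test with a single frequency dict built in one pass followed by a threshold reduction all(v >= 2) over the counts.
import Mathlib
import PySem

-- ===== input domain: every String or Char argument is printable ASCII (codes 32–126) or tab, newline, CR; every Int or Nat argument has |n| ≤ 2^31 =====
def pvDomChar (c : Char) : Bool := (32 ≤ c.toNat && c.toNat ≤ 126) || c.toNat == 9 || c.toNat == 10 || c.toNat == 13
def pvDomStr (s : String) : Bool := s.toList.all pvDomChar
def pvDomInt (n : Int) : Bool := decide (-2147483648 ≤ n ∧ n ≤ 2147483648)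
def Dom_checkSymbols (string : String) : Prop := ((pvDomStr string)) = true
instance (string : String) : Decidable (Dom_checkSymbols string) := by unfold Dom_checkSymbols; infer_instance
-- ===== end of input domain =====

-- B builds one frequency dict and checks all counts ≥ 2 instead of maintaining two sets and comparing them (idiomatic rewrite, same O(n)).


-- ===== PORT A =====
-- two sets: symbols1 = seen at least once, symbols2 = seen again while already in symbols1; result = set equality
def checkSymbols (string : String) : Bool :=
  let p := string.toList.foldl
    (fun (p : PySem.Set Char × PySem.Set Char) s =>
      if !(PySem.Set.contains p.1 s) then (PySem.Set.add p.1 s, p.2)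
      else (p.1, PySem.Set.add p.2 s))
    (PySem.Set.empty, PySem.Set.empty)
  PySem.Set.equal p.1 p.2

-- ===== PORT B =====
-- one frequency dict (counts[s] = counts.get(s, 0) + 1), then all(v >= 2 for v in counts.values())
def checkSymbols_alt (string : String) : Bool :=
  let counts := string.toList.foldl
    (fun (d : PySem.Dict Char Int) s => d.insert s (d.getD s 0 + 1))
    PySem.Dict.empty
  counts.values.all (fun v => decide (2 ≤ v))

-- ===== PRECONDITION & SPEC =====
def Spec_checkSymbols (string : String) (out : Bool) : Prop := out = checkSymbols_alt string
instance (string : String) (out : Bool) : Decidable (Spec_checkSymbols string out) := by unfold Spec_checkSymbols; infer_instance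

-- ===== CLAIM (what is proved, stated in full; the proofs are below) =====
def Claim_equal_checkSymbols : Prop := ∀ (string : String), Dom_checkSymbols string → Spec_checkSymbols string (checkSymbols string)

-- ===== LEMMAS AND PROOFS =====

-- invariant of A's loop: first set collects the elements seen, second set the elements seen at least twice
lemma checkSymbols_loop_mem (l : List Char) (s1 s2 : PySem.Set Char) :
    (∀ x, x ∈ (l.foldl
      (fun (p : PySem.Set Char × PySem.Set Char) s =>
        if !(PySem.Set.contains p.1 s) then (PySem.Set.add p.1 s, p.2)
        else (p.1, PySem.Set.add p.2 s)) (s1, s2)).1 ↔ (x ∈ s1 ∨ x ∈ l)) ∧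
    (∀ x, x ∈ (l.foldl
      (fun (p : PySem.Set Char × PySem.Set Char) s =>
        if !(PySem.Set.contains p.1 s) then (PySem.Set.add p.1 s, p.2)
        else (p.1, PySem.Set.add p.2 s)) (s1, s2)).2 ↔
      (x ∈ s2 ∨ (x ∈ s1 ∧ x ∈ l) ∨ 2 ≤ l.count x)) := by
  induction l generalizing s1 s2 with
  | nil => simp
  | cons c t ih =>
    by_cases hc : c ∈ s1
    · have hcon : PySem.Set.contains s1 c = true := (PySem.Set.contains_iff s1 c).mpr hc
      simp only [List.foldl_cons, hcon, Bool.not_true, Bool.false_eq_true, if_false]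
      obtain ⟨ih1, ih2⟩ := ih s1 (PySem.Set.add s2 c)
      refine ⟨fun x => ?_, fun x => ?_⟩
      · rw [ih1]
        constructor
        · rintro (h | h) <;> simp_all
        · rintro (h | h)
          · exact Or.inl h
          · rcases List.mem_cons.mp h with rfl | h
            · exact Or.inl hc
            · exact Or.inr h
      · rw [ih2, PySem.Set.mem_add]
        by_cases hx : x = c
        · subst hx
          constructor
          · intro _
            exact Or.inr (Or.inl ⟨hc, List.mem_cons_self⟩)
          · intro _
            exact Or.inl (Or.inr rfl)
        · rw [List.count_cons_of_ne (Ne.symm hx)]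
          simp only [List.mem_cons, hx, false_or]
          tauto
    · have hcon : PySem.Set.contains s1 c = false := by
        cases h : PySem.Set.contains s1 c
        · rfl
        · exact absurd ((PySem.Set.contains_iff s1 c).mp h) hc
      simp only [List.foldl_cons, hcon, Bool.not_false, if_true]
      obtain ⟨ih1, ih2⟩ := ih (PySem.Set.add s1 c) s2
      refine ⟨fun x => ?_, fun x => ?_⟩
      · rw [ih1, PySem.Set.mem_add]
        constructor
        · rintro ((h | rfl) | h) <;> simp_all
        · rintro (h | h)
          · exact Or.inl (Or.inl h)
          · rcases List.mem_cons.mp h with rfl | h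
            · exact Or.inl (Or.inr rfl)
            · exact Or.inr h
      · rw [ih2]
        by_cases hx : x = c
        · subst hx
          rw [List.count_cons_self]
          have h1 : x ∈ t ↔ 1 ≤ t.count x := by
            rw [Nat.one_le_iff_ne_zero, Ne, List.count_eq_zero]; tauto
          have hmem : x ∈ PySem.Set.add s1 x := (PySem.Set.mem_add (s := s1) (x := x) (y := x)).mpr (Or.inr rfl)
          constructor
          · rintro (h | ⟨_, ht⟩ | h)
            · exact Or.inl h
            · right; right; have := h1.mp ht; omega
            · right; right; omega
          · rintro (h | ⟨h, _⟩ | h)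
            · exact Or.inl h
            · exact absurd h hc
            · rcases Nat.lt_or_ge (t.count x) 1 with h' | h'
              · omega
              · exact Or.inr (Or.inl ⟨hmem, h1.mpr h'⟩)
        · rw [List.count_cons_of_ne (Ne.symm hx)]
          simp only [PySem.Set.mem_add, List.mem_cons, hx, false_or, or_false]

-- A's result characterized: every character of the string occurs at least twice
lemma checkSymbols_eq_true_iff (string : String) :
    checkSymbols string = true ↔
      ∀ x ∈ string.toList, 2 ≤ string.toList.count x := by
  unfold checkSymbols
  obtain ⟨h1, h2⟩ := checkSymbols_loop_mem string.toList PySem.Set.empty PySem.Set.empty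
  rw [PySem.Set.equal_iff]
  constructor
  · intro h x hx
    have := (h x).mp ((h1 x).mpr (Or.inr hx))
    rcases (h2 x).mp this with h' | ⟨h', _⟩ | h'
    · simp [PySem.Set.empty] at h'
    · simp [PySem.Set.empty] at h'
    · exact h'
  · intro h x
    rw [h1, h2]
    constructor
    · rintro (h' | h')
      · simp [PySem.Set.empty] at h'
      · exact Or.inr (Or.inr (h x h'))
    · rintro (h' | ⟨h', _⟩ | h')
      · simp [PySem.Set.empty] at h'
      · simp [PySem.Set.empty] at h'
      · right
        exact List.count_pos_iff.mp (by omega)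

-- B's result characterized the same way
lemma checkSymbols_alt_eq_true_iff (string : String) :
    checkSymbols_alt string = true ↔
      ∀ x ∈ string.toList, 2 ≤ string.toList.count x := by
  unfold checkSymbols_alt
  rw [PySem.Dict.foldl_insert_getD_add_one_eq_counter]
  simp only [PySem.Dict.values, PySem.Dict.items_counter, List.map_map, List.all_map,
    List.all_eq_true, Function.comp]
  constructor
  · intro h x hx
    have := h x (by rw [PySem.Set.mem_ofList]; exact hx)
    simp only [decide_eq_true_eq] at this
    exact_mod_cast this
  · intro h x hx
    rw [PySem.Set.mem_ofList] at hx
    simp only [decide_eq_true_eq]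
    exact_mod_cast h x hx

-- ===== VERDICT (by name: the statement is the Claim_ definition above) =====
theorem checkSymbols_spec : Claim_equal_checkSymbols := by
  intro string _
  unfold Spec_checkSymbols
  rw [Bool.eq_iff_iff, checkSymbols_eq_true_iff, checkSymbols_alt_eq_true_iff]
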